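-- pv_equiv track=rewrite | github.com/SteGala/Plebiscito-robot | src/simulator.py | compute_delay_solutions
-- ===== SOURCE A (Python) =====
-- import copy
--
-- def compute_delay_solutions(targets, duration):
--     def sol_r(n, targets, sol, all_sol):
--         if n == len(targets):
--             all_sol.append(copy.deepcopy(sol))
--             return
--
--         for i in range(duration):
--             sol[n] = i * 5
--             sol_r(n+1, targets, sol, all_sol)
--
--     sol = [-1 for _ in range(len(targets))]
--     all_sol = []
--
--     sol_r(0, targets, sol, all_sol)
--
--     return all_sol
-- ===== SOURCE B (Python) =====
-- def compute_delay_solutions(targets, duration):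
--     vals = [i * 5 for i in range(duration)]
--     out = [[]]
--     for _ in targets:
--         out = [s + [v] for s in out for v in vals]
--     return out
-- ===== Notes on version B (the rewrite author's own statement) =====
-- stated objective: simpler
-- what changed: Replaces the recursive depth-first enumeration with a shared mutated buffer and deepcopy by an iterative level-by-level Cartesian-product build (one fold over targets extending every partial solution by each delay value).
import Mathlib
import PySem

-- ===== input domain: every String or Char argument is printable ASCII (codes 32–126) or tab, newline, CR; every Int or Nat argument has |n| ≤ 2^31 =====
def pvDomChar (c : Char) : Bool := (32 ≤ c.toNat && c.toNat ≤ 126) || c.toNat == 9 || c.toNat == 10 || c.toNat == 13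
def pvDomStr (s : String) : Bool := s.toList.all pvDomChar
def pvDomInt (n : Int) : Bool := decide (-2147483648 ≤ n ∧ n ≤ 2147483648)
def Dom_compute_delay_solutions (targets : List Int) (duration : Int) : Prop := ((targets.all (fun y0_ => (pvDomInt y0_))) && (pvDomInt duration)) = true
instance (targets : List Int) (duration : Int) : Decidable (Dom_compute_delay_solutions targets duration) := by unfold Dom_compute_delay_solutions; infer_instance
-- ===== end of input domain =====

-- B replaces A's recursive depth-first enumeration (shared mutated buffer + deepcopy)
-- by an iterative level-by-level Cartesian-product build; objective: simpler.

-- ===== PORT A =====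
-- sol_r(n, targets, sol, all_sol): the Python mutates `sol` in place and appends to
-- `all_sol`; here both are threaded as state.  The guard `n == len(targets)` is
-- expressed through the fuel `rem = len(targets) - n` (rem = 0 ↔ n = len), which is
-- the same test on every reachable call.
def pySolR (duration : Int) : Nat → Nat → List Int → List (List Int) → List Int × List (List Int)
  | 0, _, sol, allSol => (sol, allSol ++ [sol])
  | rem + 1, n, sol, allSol =>
      (PySem.List.pyRange 0 duration 1).foldl
        (fun st i => pySolR duration rem (n + 1) (st.1.set n (i * 5)) st.2)
        (sol, allSol)

def compute_delay_solutions (targets : List Int) (duration : Int) : List (List Int) :=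
  let sol : List Int := (List.range targets.length).map (fun _ => (-1 : Int))
  (pySolR duration targets.length 0 sol []).2

-- ===== PORT B =====
def compute_delay_solutions_alt (targets : List Int) (duration : Int) : List (List Int) :=
  let vals : List Int := (PySem.List.pyRange 0 duration 1).map (fun i => i * 5)
  targets.foldl (fun out _ => out.flatMap (fun s => vals.map (fun v => s ++ [v]))) [[]]

-- ===== PRECONDITION & SPEC =====
def Spec_compute_delay_solutions (targets : List Int) (duration : Int) (out : List (List Int)) : Prop := out = compute_delay_solutions_alt targets duration
instance (targets : List Int) (duration : Int) (out : List (List Int)) : Decidable (Spec_compute_delay_solutions targets duration out) := by unfold Spec_compute_delay_solutions; infer_instance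

-- ===== CLAIM (what is proved, stated in full; the proofs are below) =====
def Claim_equal_compute_delay_solutions : Prop := ∀ (targets : List Int) (duration : Int), Dom_compute_delay_solutions targets duration → Spec_compute_delay_solutions targets duration (compute_delay_solutions targets duration)

-- ===== LEMMAS AND PROOFS =====

-- canonical product list, head-first (A's depth-first order): prodC k vals
-- is the list of all length-k tuples over vals, leftmost position slowest.
def prodC (vals : List Int) : Nat → List (List Int)
  | 0 => [[]]
  | k + 1 => vals.flatMap (fun v => (prodC vals k).map (fun t => v :: t))

-- one step of B's fold
def stepB (vals : List Int) (out : List (List Int)) : List (List Int) :=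
  out.flatMap (fun s => vals.map (fun v => s ++ [v]))

theorem take_set_succ (sol : List Int) (n : Nat) (v : Int) (h : n < sol.length) :
    (sol.set n v).take (n + 1) = sol.take n ++ [v] := by
  apply List.ext_getElem
  · simp; omega
  · intro i h1 h2
    have hi : i < n + 1 := by simp at h1; omega
    by_cases hin : i < n
    · have : i < (List.take n sol).length := by simp; omega
      rw [List.getElem_append_left this]
      simp [List.getElem_take, Nat.ne_of_gt hin]
    · have hieq : i = n := by omega
      subst hieq
      have hl : (List.take i sol).length = i := by simp; omega
      rw [List.getElem_append_right (by omega)]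
      simp [hl]

theorem take_set_of_le (sol : List Int) (n m : Nat) (v : Int) (h : m ≤ n) :
    (sol.set n v).take m = sol.take m := by
  apply List.ext_getElem
  · simp
  · intro i h1 h2
    simp only [List.getElem_take, List.getElem_set]
    have him : i < m := by
      have := h1; simp at this; omega
    have : ¬ n = i := by omega
    simp [this]

-- characterization of A's recursion
theorem pySolR_spec (duration : Int) :
    ∀ (rem n : Nat) (sol : List Int) (acc : List (List Int)),
      sol.length = n + rem →
      (pySolR duration rem n sol acc).2
          = acc ++ (prodC ((PySem.List.pyRange 0 duration 1).map (fun i => i * 5)) rem).map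
              (fun t => sol.take n ++ t)
        ∧ (pySolR duration rem n sol acc).1.length = n + rem
        ∧ (pySolR duration rem n sol acc).1.take n = sol.take n := by
  intro rem
  induction rem with
  | zero =>
    intro n sol acc h
    have ht : List.take n sol = sol := List.take_of_length_le (by omega)
    exact ⟨by simp [pySolR, prodC, ht], h, rfl⟩
  | succ rem ih =>
    intro n sol acc h
    -- the fold over the range, with i*5 applied in the body, is a fold over vals
    have hfold : ∀ (ws : List Int) (sol : List Int) (acc : List (List Int)),
        sol.length = n + (rem + 1) →
        (ws.foldl (fun st v => pySolR duration rem (n + 1) (st.1.set n v) st.2) (sol, acc)).2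
            = acc ++ ws.flatMap (fun v =>
                (prodC ((PySem.List.pyRange 0 duration 1).map (fun i => i * 5)) rem).map
                  (fun t => sol.take n ++ v :: t))
          ∧ (ws.foldl (fun st v => pySolR duration rem (n + 1) (st.1.set n v) st.2) (sol, acc)).1.length = n + (rem + 1)
          ∧ (ws.foldl (fun st v => pySolR duration rem (n + 1) (st.1.set n v) st.2) (sol, acc)).1.take n = sol.take n := by
      intro ws
      induction ws with
      | nil => intro sol acc h; simp [h]
      | cons w ws ihw =>
        intro sol acc h
        have hn : n < sol.length := by omega
        have hlen' : (sol.set n w).length = (n + 1) + rem := by simp; omega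
        obtain ⟨h1, h2, h3⟩ := ih (n + 1) (sol.set n w) acc hlen'
        have htake : (sol.set n w).take (n + 1) = sol.take n ++ [w] :=
          take_set_succ sol n w hn
        have hlen2 : (pySolR duration rem (n + 1) (sol.set n w) acc).1.length = n + (rem + 1) := by omega
        have htn : List.take n (pySolR duration rem (n + 1) (sol.set n w) acc).1
            = List.take n sol := by
          calc List.take n (pySolR duration rem (n + 1) (sol.set n w) acc).1
              = List.take n (List.take (n + 1) (pySolR duration rem (n + 1) (sol.set n w) acc).1) := by
                simp [List.take_take]
            _ = List.take n (List.take (n + 1) (sol.set n w)) := by rw [h3]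
            _ = List.take n (sol.set n w) := by simp [List.take_take]
            _ = List.take n sol := take_set_of_le sol n n w le_rfl
        obtain ⟨g1, g2, g3⟩ := ihw (pySolR duration rem (n + 1) (sol.set n w) acc).1
          (pySolR duration rem (n + 1) (sol.set n w) acc).2 hlen2
        simp only [htn] at g1
        refine ⟨?_, ?_, ?_⟩
        · simp only [List.foldl_cons]
          rw [g1, h1, htake]
          simp [List.flatMap_cons, List.append_assoc]
        · simpa using g2
        · simp only [List.foldl_cons]
          rw [g3, htn]
    have key : pySolR duration (rem + 1) n sol acc
        = (PySem.List.pyRange 0 duration 1).foldl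
            (fun st i => pySolR duration rem (n + 1) (st.1.set n (i * 5)) st.2) (sol, acc) := by
      simp [pySolR]
    have hmap := hfold ((PySem.List.pyRange 0 duration 1).map (fun i => i * 5)) sol acc h
    rw [List.foldl_map] at hmap
    obtain ⟨m1, m2, m3⟩ := hmap
    refine ⟨?_, ?_, ?_⟩
    · rw [key, m1]
      simp [prodC, List.map_flatMap, Function.comp_def]
    · rw [key]; exact m2
    · rw [key]; exact m3

-- B's single step, pushed to the front: stepB commutes with head-extension
theorem prodC_succ_back (vals : List Int) :
    ∀ k, prodC vals (k + 1) = stepB vals (prodC vals k) := by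
  have h1 : ∀ (v : Int) (P : List (List Int)),
      (stepB vals P).map (fun t => v :: t) = stepB vals (P.map (fun t => v :: t)) := by
    intro v P
    induction P with
    | nil => simp [stepB]
    | cons s P ihP =>
      simp only [stepB, List.flatMap_cons, List.map_append] at ihP ⊢
      rw [ihP]
      simp [Function.comp_def]
  have h2 : ∀ (l : List Int) (g : Int → List (List Int)),
      stepB vals (l.flatMap g) = l.flatMap (fun x => stepB vals (g x)) := by
    intro l g
    induction l with
    | nil => simp [stepB]
    | cons x l ihl =>
      simp only [List.flatMap_cons]
      rw [show stepB vals (g x ++ l.flatMap g) = stepB vals (g x) ++ stepB vals (l.flatMap g)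
        from by simp [stepB, List.flatMap_append], ihl]
  have h0 : ∀ (l : List Int), l.flatMap (fun v => ([[v]] : List (List Int))) = l.map (fun v => [v]) := by
    intro l
    induction l with
    | nil => rfl
    | cons a l ihl => simp_all [List.flatMap_cons]
  intro k
  induction k with
  | zero =>
    show prodC vals 1 = stepB vals [[]]
    simp only [stepB, List.flatMap_cons, List.flatMap_nil, List.append_nil]
    show vals.flatMap (fun v => [[v]]) = vals.map (fun v => [] ++ [v])
    simp [h0]
  | succ k ih =>
    show prodC vals (k + 2) = stepB vals (prodC vals (k + 1))
    have hdef : prodC vals (k + 2)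
        = vals.flatMap (fun v => (prodC vals (k + 1)).map (fun t => v :: t)) := rfl
    rw [hdef, ih]
    simp only [h1]
    rw [← h2]
    rw [show vals.flatMap (fun v => (prodC vals k).map (fun t => v :: t)) = prodC vals (k + 1)
      from rfl, ih]

-- B's fold over targets computes prodC (length targets)
theorem foldB_spec (vals : List Int) :
    ∀ (ts : List Int) (out k : _), out = prodC vals k →
      ts.foldl (fun out _ => stepB vals out) out = prodC vals (ts.length + k) := by
  intro ts
  induction ts with
  | nil => intro out k h; simpa using h
  | cons t ts ih =>
    intro out k h
    simp only [List.foldl_cons, List.length_cons]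
    have : stepB vals out = prodC vals (k + 1) := by rw [h, prodC_succ_back]
    rw [ih _ (k + 1) this]
    congr 1
    omega

-- ===== VERDICT (by name: the statement is the Claim_ definition above) =====
theorem compute_delay_solutions_spec : Claim_equal_compute_delay_solutions := by
  intro targets duration _
  unfold Spec_compute_delay_solutions compute_delay_solutions compute_delay_solutions_alt
  set vals : List Int := (PySem.List.pyRange 0 duration 1).map (fun i => i * 5) with hv
  have hlen : ((List.range targets.length).map (fun _ => (-1 : Int))).length
      = 0 + targets.length := by simp
  obtain ⟨h1, _, _⟩ := pySolR_spec duration targets.length 0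
    ((List.range targets.length).map (fun _ => (-1 : Int))) [] hlen
  have hb := foldB_spec vals targets [[]] 0 rfl
  rw [Nat.add_zero] at hb
  simp only [← hv] at h1
  rw [h1]
  simp only [List.take_zero, List.nil_append, List.map_id', List.nil_append]
  rw [show (fun (out : List (List Int)) (_ : Int) => stepB vals out)
      = (fun out _ => out.flatMap (fun s => vals.map (fun v => s ++ [v]))) from rfl] at hb
  rw [hb]
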